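-- pv_equiv track=rewrite | github.com/daniel-reich/ubiquitous-fiesta | HzeTvQqnH2afZs6GY_12.py | generate_rug
-- ===== SOURCE A (Python) =====
-- def generate_rug(n, direction):
--   dict = {"left": 1, "right": 0}
--   lst, x = [], 0
--   d = dict.get(direction)
--   l = (1 if d else 0)
--   r = (0 if d else 1)
--   for i in range(0, n):
--     f = x*l + (n-x-1)*r
--     s = (x+1)*r + (n-x)*l
--     lst.append([i for i in range(f, 0, -1)] + [i for i in range(0, s)])
--     x += 1
--   return lst
-- ===== SOURCE B (Python) =====
-- def generate_rug(n, direction):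
--     if direction == "left":
--         return [[abs(i - j) for j in range(n)] for i in range(n)]
--     return [[abs(j - (n - 1 - i)) for j in range(n)] for i in range(n)]
-- ===== Notes on version B (the rewrite author's own statement) =====
-- stated objective: simpler
-- what changed: Each row is generated by a single absolute-value distance formula abs(i-j) (or abs(j-(n-1-i))) swept across the columns, replacing A's dict-based flag arithmetic and per-row concatenation of a descending and an ascending range.
import Mathlib
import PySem

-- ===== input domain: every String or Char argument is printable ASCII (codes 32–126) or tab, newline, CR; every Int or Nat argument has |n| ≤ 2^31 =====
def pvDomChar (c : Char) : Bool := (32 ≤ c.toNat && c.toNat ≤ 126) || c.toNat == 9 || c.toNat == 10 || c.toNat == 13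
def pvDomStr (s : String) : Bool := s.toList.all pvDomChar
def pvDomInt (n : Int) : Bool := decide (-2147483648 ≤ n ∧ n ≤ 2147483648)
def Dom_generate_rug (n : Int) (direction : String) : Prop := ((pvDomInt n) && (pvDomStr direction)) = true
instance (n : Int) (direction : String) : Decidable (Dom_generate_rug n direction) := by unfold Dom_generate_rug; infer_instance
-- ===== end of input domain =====

-- B generates each row by one absolute-value distance formula instead of A's dict-flag
-- arithmetic and concatenation of two ranges; objective: simpler.

-- ===== PORT A =====
-- truthiness of a Python value that is either None or an int (d truthy ⇔ some nonzero int)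
def pvTruthyOptInt : Option Int → Bool
  | some v => v != 0
  | none => false

def generate_rug (n : Int) (direction : String) : List (List Int) :=
  let dict : PySem.Dict String Int := ((PySem.Dict.empty.insert "left" 1).insert "right" 0)
  let d := dict.get? direction
  let l : Int := if pvTruthyOptInt d then 1 else 0
  let r : Int := if pvTruthyOptInt d then 0 else 1
  let res := (PySem.List.pyRange 0 n 1).foldl
    (fun (st : List (List Int) × Int) (_i : Int) =>
      let lst := st.1
      let x := st.2
      let f := x * l + (n - x - 1) * r
      let s := (x + 1) * r + (n - x) * l
      (lst ++ [PySem.List.pyRange f 0 (-1) ++ PySem.List.pyRange 0 s 1], x + 1))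
    ([], 0)
  res.1

-- ===== PORT B =====
def generate_rug_alt (n : Int) (direction : String) : List (List Int) :=
  if direction == "left" then
    (PySem.List.pyRange 0 n 1).map (fun i => (PySem.List.pyRange 0 n 1).map (fun j => |i - j|))
  else
    (PySem.List.pyRange 0 n 1).map (fun i => (PySem.List.pyRange 0 n 1).map (fun j => |j - (n - 1 - i)|))

-- ===== PRECONDITION & SPEC =====
def Spec_generate_rug (n : Int) (direction : String) (out : List (List Int)) : Prop := out = generate_rug_alt n direction
instance (n : Int) (direction : String) (out : List (List Int)) : Decidable (Spec_generate_rug n direction out) := by unfold Spec_generate_rug; infer_instance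

-- ===== CLAIM (what is proved, stated in full; the proofs are below) =====
def Claim_equal_generate_rug : Prop := ∀ (n : Int) (direction : String), Dom_generate_rug n direction → Spec_generate_rug n direction (generate_rug n direction)

-- ===== LEMMAS AND PROOFS =====

-- A's loop appends F x for x = start, start+1, … (the loop variable i is unused in the body).
lemma foldA (F : Int → List Int) : ∀ (L : List Int) (x : Int) (lst : List (List Int)),
    (L.foldl (fun (st : List (List Int) × Int) (_ : Int) => (st.1 ++ [F st.2], st.2 + 1)) (lst, x)).1
      = lst ++ (List.range L.length).map (fun k : Nat => F (x + (k : Int)))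
  | [], x, lst => by simp
  | (i :: L), x, lst => by
      simp only [List.foldl_cons, List.length_cons, List.range_succ_eq_map, List.map_cons,
        List.map_map]
      rw [foldA F L (x + 1) (lst ++ [F x])]
      simp only [List.append_assoc, List.singleton_append]
      congr 1
      congr 1
      · norm_num
      · apply List.map_congr_left
        intro k _
        simp only [Function.comp]
        congr 1
        push_cast
        ring

-- one row: countdown-from-m concatenated with count-up equals distances from column m
lemma row_eq (n m : Int) (h0 : 0 ≤ m) (h1 : m < n) :
    PySem.List.pyRange m 0 (-1) ++ PySem.List.pyRange 0 (n - m) 1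
      = (PySem.List.pyRange 0 n 1).map (fun j => |m - j|) := by
  rw [PySem.List.pyRange_one_append 0 m n h0 (le_of_lt h1), List.map_append,
    PySem.List.pyRange_neg_one, PySem.List.pyRange_one 0 (n - m), PySem.List.pyRange_one 0 m,
    PySem.List.pyRange_one m n, List.map_map, List.map_map]
  congr 1
  · apply List.map_congr_left
    intro k hk
    simp only [List.mem_range] at hk
    simp only [Function.comp, Int.zero_add]
    rw [abs_of_nonneg (by omega)]
  · rw [show n - m - 0 = n - m from by ring]
    apply List.map_congr_left
    intro k hk
    simp only [Function.comp, Int.zero_add]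
    have h : m - (m + (k : Int)) = -(k : Int) := by ring
    rw [h, abs_neg, Int.abs_natCast]

-- row_eq with the column range written as A's proofs see it after pyRange_one
lemma row_eq' (n m : Int) (h0 : 0 ≤ m) (h1 : m < n) :
    PySem.List.pyRange m 0 (-1) ++ PySem.List.pyRange 0 (n - m) 1
      = List.map (fun j => |m - j|)
          (List.map (fun k : Nat => (0 : Int) + (k : Int)) (List.range n.toNat)) := by
  rw [row_eq n m h0 h1, PySem.List.pyRange_one 0 n]
  norm_num

lemma generate_rug_eq_rows (n : Int) (l r : Int) (dir : String)
    (hTr : pvTruthyOptInt (((PySem.Dict.empty.insert "left" 1).insert "right" 0 :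
        PySem.Dict String Int).get? dir) = (l == 1))
    (hlr : (l = 1 ∧ r = 0) ∨ (l = 0 ∧ r = 1)) :
    generate_rug n dir = (List.range n.toNat).map
      (fun (k : Nat) => PySem.List.pyRange ((k : Int) * l + (n - k - 1) * r) 0 (-1) ++
        PySem.List.pyRange 0 (((k : Int) + 1) * r + (n - k) * l) 1) := by
  unfold generate_rug
  simp only [hTr]
  have hbool : ((l == 1) = true → ((if (l == 1) = true then (1:Int) else 0) = l ∧
      (if (l == 1) = true then (0:Int) else 1) = r)) ∧
      ((l == 1) = false → ((if (l == 1) = true then (1:Int) else 0) = l ∧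
      (if (l == 1) = true then (0:Int) else 1) = r)) := by
    rcases hlr with ⟨hl, hr⟩ | ⟨hl, hr⟩ <;> subst hl <;> subst hr <;> simp
  rcases Bool.eq_false_or_eq_true (l == 1) with hb | hb <;>
    rcases (if hb' : (l == 1) = true then hbool.1 hb' else hbool.2 (by simpa using hb'))
      with ⟨h1, h2⟩ <;>
  · simp only [h1, h2]
    rw [foldA (fun x => PySem.List.pyRange (x * l + (n - x - 1) * r) 0 (-1) ++
      PySem.List.pyRange 0 ((x + 1) * r + (n - x) * l) 1)]
    simp [PySem.List.length_pyRange_one]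

-- ===== VERDICT (by name: the statement is the Claim_ definition above) =====
theorem generate_rug_spec : Claim_equal_generate_rug := by
  intro n direction _
  unfold Spec_generate_rug generate_rug_alt
  by_cases hL : direction = "left"
  · subst hL
    simp only [beq_self_eq_true, if_pos]
    rw [generate_rug_eq_rows n 1 0 "left" (by decide) (Or.inl ⟨rfl, rfl⟩),
      PySem.List.pyRange_one 0 n, List.map_map]
    simp only [Int.sub_zero]
    apply List.map_congr_left
    intro k hk
    simp only [List.mem_range] at hk
    simp only [Function.comp, Int.zero_add]
    have h1 : (k : Int) * 1 + (n - k - 1) * 0 = 0 + (k : Int) := by ring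
    have h2 : ((k : Int) + 1) * 0 + (n - k) * 1 = n - (0 + (k : Int)) := by ring
    rw [h1, h2, row_eq' n (0 + (k : Int)) (by positivity) (by omega)]
    simp only [List.map_map]
    apply List.map_congr_left
    intro j _
    simp only [Function.comp]
    congr 1
    ring
  · have hne : (direction == "left") = false := by simpa using hL
    simp only [hne, Bool.false_eq_true, if_false]
    have hTr : pvTruthyOptInt (((PySem.Dict.empty.insert "left" 1).insert "right" 0 :
        PySem.Dict String Int).get? direction) = ((0 : Int) == 1) := by
      by_cases hR : direction = "right"
      · subst hR; decide
      · rw [PySem.Dict.get?_insert, if_neg hR, PySem.Dict.get?_insert, if_neg hL,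
          PySem.Dict.get?_empty]
        rfl
    rw [generate_rug_eq_rows n 0 1 direction hTr (Or.inr ⟨rfl, rfl⟩),
      PySem.List.pyRange_one 0 n, List.map_map]
    simp only [Int.sub_zero]
    apply List.map_congr_left
    intro k hk
    simp only [List.mem_range] at hk
    simp only [Function.comp, Int.zero_add]
    have h1 : (k : Int) * 0 + (n - k - 1) * 1 = n - (0 + (k : Int)) - 1 := by ring
    have h2 : ((k : Int) + 1) * 1 + (n - k) * 0 = n - (n - (0 + (k : Int)) - 1) := by ring
    rw [h1, h2, row_eq' n (n - (0 + (k : Int)) - 1) (by omega) (by omega)]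
    simp only [List.map_map]
    apply List.map_congr_left
    intro j _
    simp only [Function.comp]
    rw [abs_sub_comm]
    congr 1
    ring
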